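-- pv_equiv track=rewrite | github.com/Mass23/MetaComp | scripts/MCalign.py | TrimSequence
-- ===== SOURCE A (Python) =====
-- def IncompleteCodon(codon):
--     if '-' in codon:
--         return(True)
--     else:
--         return(False)
--
-- def StopShiftCodon(codon):
--     if (codon in ['TAA','TGA','TGA']) or ('!' in codon):
--         return(True)
--     else:
--         return(False)
--
-- def TrimSequence(sequence):
--     #Trims all nucleotides outside of codons and stop the sequence at stop codons
--     trimmed_seq = ''
--     stop_shift_codon = False
--     for pos in range(0,len(sequence),3):
--         codon = sequence[pos:pos+3]
--
--         # Is the gene already finished?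
--         if stop_shift_codon == True:
--             trimmed_seq = trimmed_seq + '---'
--         # Is the codon incomplete? Does it contains a stop or frameshift?
--         else:
--             incomplete = IncompleteCodon(codon)
--             if incomplete == True:
--                 trimmed_seq = trimmed_seq + '---'
--             else:
--                 stopshift = StopShiftCodon(codon)
--                 if stopshift == True:
--                     stop_shift_codon = True
--                     trimmed_seq = trimmed_seq + '---'
--     return(trimmed_seq)
-- ===== SOURCE B (Python) =====
-- def TrimSequence(sequence):
--     # Alternative decomposition: split into codons, find the first effective stop/frameshift
--     # codon, then count dashed triplets and emit them in one string multiplication.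
--     codons = [sequence[i:i+3] for i in range(0, len(sequence), 3)]
--     s = next((i for i, c in enumerate(codons)
--               if '-' not in c and (c in ('TAA', 'TGA') or '!' in c)),
--              len(codons))
--     n = sum('-' in c for c in codons[:s]) + (len(codons) - s)
--     return '---' * n
-- ===== Notes on version B (the rewrite author's own statement) =====
-- stated objective: simpler
-- what changed: Replaces A's stateful fold (carrying a stop flag and appending '---' per codon) by split-into-codons, find the first effective stop index, count dashed triplets, and emit them with one string multiplication.
import Mathlib
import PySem

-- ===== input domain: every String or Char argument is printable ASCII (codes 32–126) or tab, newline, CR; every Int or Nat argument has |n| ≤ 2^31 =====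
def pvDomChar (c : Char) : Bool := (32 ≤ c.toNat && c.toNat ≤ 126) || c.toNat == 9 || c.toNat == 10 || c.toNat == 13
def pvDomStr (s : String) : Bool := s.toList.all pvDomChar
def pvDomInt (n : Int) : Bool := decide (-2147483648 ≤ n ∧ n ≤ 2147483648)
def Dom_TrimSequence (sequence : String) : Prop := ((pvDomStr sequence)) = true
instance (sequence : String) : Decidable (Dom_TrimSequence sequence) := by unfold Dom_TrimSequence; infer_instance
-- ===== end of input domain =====

-- B replaces A's stateful per-codon loop by find-the-first-stop, count dashed triplets,
-- and one string multiplication (objective: simpler decomposition, same cost).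


-- ===== PORT A =====
-- A's helper: '-' in codon (substring test on code points, exact via PySem.Chars.isIn)
def IncompleteCodon (codon : List Char) : Bool :=
  if PySem.Chars.isIn ['-'] codon = true then true else false

-- A's helper: codon in ['TAA','TGA','TGA'] or '!' in codon
def StopShiftCodon (codon : List Char) : Bool :=
  if codon ∈ [['T','A','A'], ['T','G','A'], ['T','G','A']] ∨ PySem.Chars.isIn ['!'] codon = true
  then true else false

-- literal port of A: one fold over range(0, len, 3) carrying (trimmed_seq, stop_shift_codon)
def TrimSequence (sequence : String) : String :=
  let cs := sequence.toList
  let res := (PySem.List.pyRange 0 (cs.length : Int) 3).foldl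
    (fun (st : List Char × Bool) pos =>
      let codon := PySem.List.slice cs (some pos) (some (pos + 3))
      if st.2 = true then (st.1 ++ ['-','-','-'], st.2)
      else if IncompleteCodon codon = true then (st.1 ++ ['-','-','-'], st.2)
      else if StopShiftCodon codon = true then (st.1 ++ ['-','-','-'], true)
      else st)
    ([], false)
  String.ofList res.1

-- ===== PORT B =====
-- port of Source B's next(...): index of the first codon with no '-' that is a stop ('TAA'/'TGA')
-- or contains '!'; the length of the list if there is none
def pvFindStop : List (List Char) → Nat
  | [] => 0
  | c :: rest =>
    if PySem.Chars.isIn ['-'] c = false ∧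
       (c = ['T','A','A'] ∨ c = ['T','G','A'] ∨ PySem.Chars.isIn ['!'] c = true)
    then 0
    else pvFindStop rest + 1

-- literal port of B: codon list, first stop index s, count of dashed triplets, '---' * n
def TrimSequence_alt (sequence : String) : String :=
  let codons := (PySem.List.pyRange 0 (sequence.toList.length : Int) 3).map
      (fun i => PySem.List.slice sequence.toList (some i) (some (i + 3)))
  let s := pvFindStop codons
  let n := (codons.take s).countP (fun c => PySem.Chars.isIn ['-'] c) + (codons.length - s)
  String.ofList (PySem.List.pyRepeat ['-','-','-'] (n : Int))

-- ===== PRECONDITION & SPEC =====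
def Spec_TrimSequence (sequence : String) (out : String) : Prop := out = TrimSequence_alt sequence
instance (sequence : String) (out : String) : Decidable (Spec_TrimSequence sequence out) := by unfold Spec_TrimSequence; infer_instance

-- ===== CLAIM (what is proved, stated in full; the proofs are below) =====
def Claim_equal_TrimSequence : Prop := ∀ (sequence : String), Dom_TrimSequence sequence → Spec_TrimSequence sequence (TrimSequence sequence)

-- ===== LEMMAS AND PROOFS =====

-- A's loop body, abstracted over the codon (the slice is factored out by List.foldl_map)
def pvBodyA (st : List Char × Bool) (codon : List Char) : List Char × Bool :=
  if st.2 = true then (st.1 ++ ['-','-','-'], st.2)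
  else if IncompleteCodon codon = true then (st.1 ++ ['-','-','-'], st.2)
  else if StopShiftCodon codon = true then (st.1 ++ ['-','-','-'], true)
  else st

-- B's count of dashed triplets, on a codon list
def pvCnt (l : List (List Char)) : Nat :=
  (l.take (pvFindStop l)).countP (fun c => PySem.Chars.isIn ['-'] c) + (l.length - pvFindStop l)

theorem pvStop_iff (c : List Char) :
    StopShiftCodon c = true ↔
      (c = ['T','A','A'] ∨ c = ['T','G','A'] ∨ PySem.Chars.isIn ['!'] c = true) := by
  simp only [StopShiftCodon, List.mem_cons, List.not_mem_nil, or_false]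
  split_ifs with hc
  · simp only [true_iff]; tauto
  · simp only [false_iff]; tauto

theorem pvRepeat_succ (n : Nat) :
    PySem.List.pyRepeat ['-','-','-'] ((n + 1 : Nat) : Int)
      = ['-','-','-'] ++ PySem.List.pyRepeat ['-','-','-'] (n : Int) := by
  simp [PySem.List.pyRepeat, List.replicate_succ]

theorem pvFoldA_true (l : List (List Char)) (acc : List Char) :
    (l.foldl pvBodyA (acc, true)).1
      = acc ++ PySem.List.pyRepeat ['-','-','-'] ((l.length : Nat) : Int) := by
  induction l generalizing acc with
  | nil => simp [PySem.List.pyRepeat]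
  | cons c rest ih =>
      have hstep : (c :: rest).foldl pvBodyA (acc, true)
          = rest.foldl pvBodyA (acc ++ ['-','-','-'], true) := by
        simp [pvBodyA]
      rw [hstep, ih, List.length_cons, pvRepeat_succ, List.append_assoc]

theorem pvFoldA_false (l : List (List Char)) (acc : List Char) :
    (l.foldl pvBodyA (acc, false)).1
      = acc ++ PySem.List.pyRepeat ['-','-','-'] ((pvCnt l : Nat) : Int) := by
  induction l generalizing acc with
  | nil => simp [pvCnt, pvFindStop, PySem.List.pyRepeat]
  | cons c rest ih =>
      by_cases hg : PySem.Chars.isIn ['-'] c = true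
      · -- gap codon: A appends '---' and keeps scanning; B counts it and skips it in the find
        have hstep : (c :: rest).foldl pvBodyA (acc, false)
            = rest.foldl pvBodyA (acc ++ ['-','-','-'], false) := by
          simp [pvBodyA, IncompleteCodon, hg]
        have hf : pvFindStop (c :: rest) = pvFindStop rest + 1 := by
          rw [pvFindStop, if_neg]; rintro ⟨h1, -⟩; rw [hg] at h1; exact absurd h1 (by simp)
        have hc : pvCnt (c :: rest) = pvCnt rest + 1 := by
          simp [pvCnt, hf, hg]
          omega
        rw [hstep, ih, hc, pvRepeat_succ, List.append_assoc]
      · have hg' : PySem.Chars.isIn ['-'] c = false := by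
          rw [Bool.not_eq_true] at hg; exact hg
        by_cases hs : StopShiftCodon c = true
        · -- stop/frameshift codon: A sets the flag; B's find returns this index
          have hstep : (c :: rest).foldl pvBodyA (acc, false)
              = rest.foldl pvBodyA (acc ++ ['-','-','-'], true) := by
            simp [pvBodyA, IncompleteCodon, hg, hs]
          have hf : pvFindStop (c :: rest) = 0 := by
            rw [pvFindStop, if_pos ⟨hg', (pvStop_iff c).1 hs⟩]
          have hc : pvCnt (c :: rest) = rest.length + 1 := by
            simp [pvCnt, hf]
          rw [hstep, pvFoldA_true, hc, pvRepeat_succ, List.append_assoc]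
        · -- ordinary codon: A appends nothing; B's find and count both skip it
          have hstep : (c :: rest).foldl pvBodyA (acc, false)
              = rest.foldl pvBodyA (acc, false) := by
            simp [pvBodyA, IncompleteCodon, hg, hs]
          have hf : pvFindStop (c :: rest) = pvFindStop rest + 1 := by
            rw [pvFindStop, if_neg]; rintro ⟨-, h2⟩; exact hs ((pvStop_iff c).2 h2)
          have hc : pvCnt (c :: rest) = pvCnt rest := by
            simp [pvCnt, hf, hg']
          rw [hstep, ih, hc]

-- ===== VERDICT (by name: the statement is the Claim_ definition above) =====
theorem TrimSequence_spec : Claim_equal_TrimSequence := by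
  intro sequence _
  show String.ofList ((PySem.List.pyRange 0 (sequence.toList.length : Int) 3).foldl
        (fun st pos => pvBodyA st (PySem.List.slice sequence.toList (some pos) (some (pos + 3))))
        ([], false)).1
    = String.ofList (PySem.List.pyRepeat ['-','-','-']
        ((pvCnt ((PySem.List.pyRange 0 (sequence.toList.length : Int) 3).map
            (fun i => PySem.List.slice sequence.toList (some i) (some (i + 3)))) : Nat) : Int))
  rw [← List.foldl_map, pvFoldA_false, List.nil_append]
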